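-- pv_equiv track=rewrite | github.com/alexandru-dinu/programming-challenges | advent-of-code/2025/11/solve.py | all_paths_memo_v1
-- ===== SOURCE A (Python) =====
-- def all_paths_memo_v1(G, src):
--     """
--     part1: `src` ~> out
--     part2: `src` ~> fft ~> dac ~> out
--
--     example of memo
--     mem[node]:
--         0: # paths to out
--         1: # paths to out via dac
--         2: # paths to out via fft
--         3: # paths to out via dac & fft
--
--     if we decompose:
--         #(svr->fft) * #(fft->dac) * #(dac->out)
--     we may explore beyond dst and reach out anyway
--     """
--     mem = {}
--
--     def inner(cur):
--         if cur in mem: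
--             return mem[cur]
--
--         if cur == "out":
--             return [1, 0, 0, 0]
--
--         nxt = [0, 0, 0, 0]
--
--         # traverse down
--         for v in G.get(cur, []):
--             res = inner(v)
--             for i in range(4):
--                 nxt[i] += res[i]
--
--         # update upon returning
--         if cur == "dac":
--             nxt[1] = nxt[0]
--             nxt[3] += nxt[2]
--         if cur == "fft":
--             nxt[2] = nxt[0]
--             nxt[3] += nxt[1]
--
--         mem[cur] = nxt
--         return nxt
--
--     inner(src)
--     return mem[src]
-- ===== SOURCE B (Python) =====
-- def all_paths_memo_v1(G, src):
--     # Iterative fixed-point DP: repeatedly sweep the graph, assigning a node's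
--     # 4-vector once all of its successors have known values.
--     val = {}
--     for _ in range(len(G) + 2):
--         for u, succs in G.items():
--             if u == "out" or u in val:
--                 continue
--             if all(v == "out" or v in val or v not in G for v in succs):
--                 a = b = c = d = 0
--                 for v in succs:
--                     if v == "out":
--                         a += 1
--                     elif v in val:
--                         ra, rb, rc, rd = val[v]
--                         a += ra
--                         b += rb
--                         c += rc
--                         d += rd
--                 if u == "dac":
--                     b, d = a, d + c
--                 if u == "fft":
--                     c, d = a, d + b
--                 val[u] = (a, b, c, d)
--     if src == "out":
--         return [1, 0, 0, 0]
--     if src in val: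
--         return list(val[src])
--     return [0, 0, 0, 0]
-- ===== Notes on version B (the rewrite author's own statement) =====
-- stated objective: alternative
-- what changed: Replaces A's recursive memoized DFS (a nested closure mutating a shared memo dict, returning mem[src]) by an iterative fixed-point DP: repeated relaxation sweeps over the graph that assign a node's 4-vector once all of its successors' values are known; no recursion and no per-call memo lookup.
import Mathlib
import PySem

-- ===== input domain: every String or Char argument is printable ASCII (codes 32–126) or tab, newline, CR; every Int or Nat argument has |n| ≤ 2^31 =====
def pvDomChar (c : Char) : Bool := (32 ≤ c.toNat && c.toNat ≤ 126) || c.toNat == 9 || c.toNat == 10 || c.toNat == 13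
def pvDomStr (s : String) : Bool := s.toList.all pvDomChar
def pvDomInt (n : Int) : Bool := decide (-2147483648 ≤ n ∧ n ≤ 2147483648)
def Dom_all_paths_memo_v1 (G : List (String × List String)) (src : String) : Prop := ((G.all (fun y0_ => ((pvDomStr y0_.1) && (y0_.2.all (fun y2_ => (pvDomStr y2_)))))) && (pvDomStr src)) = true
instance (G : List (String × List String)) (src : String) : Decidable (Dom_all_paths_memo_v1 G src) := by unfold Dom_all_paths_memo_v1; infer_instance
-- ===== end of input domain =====

-- B replaces A's recursive memoized DFS by an iterative fixed-point DP (repeated relaxation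
-- sweeps over the graph); equal return values are proved on Pre_ (acyclic-from-src, src ≠ "out").

-- ===== PORT A =====
-- A's `G.get(cur, [])` on the dict G (association list, first binding wins)
def pvGet (G : List (String × List String)) (k : String) : List String :=
  (List.lookup k G).getD []

-- A's `for i in range(4): nxt[i] += res[i]` on two 4-vectors (elementwise add)
def pvAddL (a b : List Int) : List Int := List.zipWith (· + ·) a b

-- A's two in-place adjustments (`if cur == "dac": …` then `if cur == "fft": …`)
def pvAdjL (cur : String) (v : List Int) : List Int :=
  let v1 := if cur == "dac" then
      [v.getD 0 0, v.getD 0 0, v.getD 2 0, v.getD 3 0 + v.getD 2 0] else v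
  if cur == "fft" then
      [v1.getD 0 0, v1.getD 1 0, v1.getD 0 0, v1.getD 3 0 + v1.getD 1 0] else v1

-- A's `inner`, fuelled (fuel G.length + 2 is enough on Pre_, proved below);
-- pvInnerList is the `for v in G.get(cur, [])` loop threading the memo dict
mutual
def pvInner (G : List (String × List String)) :
    Nat → PySem.Dict String (List Int) → String →
    Option (PySem.Dict String (List Int) × List Int)
  | 0, _, _ => none
  | fuel+1, mem, cur =>
    match mem.get? cur with
    | some v => some (mem, v)
    | none =>
      if cur == "out" then some (mem, [1, 0, 0, 0])
      else
        match pvInnerList G fuel mem (pvGet G cur) [0, 0, 0, 0] with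
        | none => none
        | some (mem1, nxt0) =>
          let nxt := pvAdjL cur nxt0
          some (mem1.insert cur nxt, nxt)
  termination_by fuel _ _ => (fuel, 0)

def pvInnerList (G : List (String × List String)) :
    Nat → PySem.Dict String (List Int) → List String → List Int →
    Option (PySem.Dict String (List Int) × List Int)
  | _, mem, [], acc => some (mem, acc)
  | fuel, mem, v :: vs, acc =>
    match pvInner G fuel mem v with
    | none => none
    | some (mem1, res) => pvInnerList G fuel mem1 vs (pvAddL acc res)
  termination_by fuel _ l _ => (fuel, l.length + 1)
end

-- `inner(src); return mem[src]` (the defaults are never reached on Pre_)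
def all_paths_memo_v1 (G : List (String × List String)) (src : String) : List Int :=
  match pvInner G (G.length + 2) PySem.Dict.empty src with
  | some (mem, _) => mem.getD src []
  | none => []

-- ===== PORT B =====
-- B's `v in G` (dict key membership)
def pvHasKey (G : List (String × List String)) (k : String) : Bool :=
  (List.lookup k G).isSome

-- B's `v == "out" or v in val or v not in G`
def pvKnown (G : List (String × List String))
    (val : PySem.Dict String (Int × Int × Int × Int)) (v : String) : Bool :=
  v == "out" || val.contains v || !pvHasKey G v

-- B's contribution of successor v to the running (a, b, c, d)
def pvValue (val : PySem.Dict String (Int × Int × Int × Int)) (v : String) :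
    Int × Int × Int × Int :=
  if v == "out" then (1, 0, 0, 0) else val.getD v (0, 0, 0, 0)

def pvVAdd (p q : Int × Int × Int × Int) : Int × Int × Int × Int :=
  (p.1 + q.1, p.2.1 + q.2.1, p.2.2.1 + q.2.2.1, p.2.2.2 + q.2.2.2)

-- B's `if u == "dac": …` / `if u == "fft": …` on the tuple
def pvAdjT (u : String) (p : Int × Int × Int × Int) : Int × Int × Int × Int :=
  let p1 := if u == "dac" then (p.1, p.1, p.2.2.1, p.2.2.2 + p.2.2.1) else p
  if u == "fft" then (p1.1, p1.2.1, p1.1, p1.2.2.2 + p1.2.1) else p1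

-- one sweep: B's `for u, succs in G.items(): …`
def pvRoundGo (G : List (String × List String)) :
    List (String × List String) → PySem.Dict String (Int × Int × Int × Int) →
    PySem.Dict String (Int × Int × Int × Int)
  | [], val => val
  | (u, succs) :: rest, val =>
    if u == "out" || val.contains u then pvRoundGo G rest val
    else if succs.all (pvKnown G val) then
      pvRoundGo G rest
        (val.insert u (pvAdjT u (succs.foldl (fun acc v => pvVAdd acc (pvValue val v)) (0, 0, 0, 0))))
    else pvRoundGo G rest val

-- the items of the dict G: first binding of each key, in order
def pvItems : List (String × List String) → List String → List (String × List String)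
  | [], _ => []
  | (u, s) :: rest, seen =>
    if seen.contains u then pvItems rest seen else (u, s) :: pvItems rest (u :: seen)

-- B's `for _ in range(len(G) + 2)` loop
def pvRounds (G : List (String × List String)) (items : List (String × List String)) :
    Nat → PySem.Dict String (Int × Int × Int × Int)
  | 0 => PySem.Dict.empty
  | n+1 => pvRoundGo G items (pvRounds G items n)

def all_paths_memo_v1_alt (G : List (String × List String)) (src : String) : List Int :=
  let val := pvRounds G (pvItems G []) (G.length + 2)
  if src == "out" then [1, 0, 0, 0]
  else
    match val.get? src with
    | some (a, b, c, d) => [a, b, c, d]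
    | none => [0, 0, 0, 0]

-- ===== PRECONDITION & SPEC =====
-- bounded cycle-detecting walk of the input graph: true iff every walk from cur
-- avoids revisiting a node (fuel G.length + 2 bounds the depth of any such walk)
def pvOk (G : List (String × List String)) : Nat → List String → String → Bool
  | 0, _, _ => false
  | f+1, path, cur =>
    if path.contains cur then false
    else if cur == "out" then true
    else (pvGet G cur).all (fun v => pvOk G f (cur :: path) v)

-- Pre_ excludes exactly the inputs where A raises: src == "out" (KeyError: mem["out"] is
-- never stored) and graphs with a directed cycle reachable from src (RecursionError).
def Pre_all_paths_memo_v1 (G : List (String × List String)) (src : String) : Prop :=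
  src ≠ "out" ∧ pvOk G (G.length + 2) [] src = true
instance (G : List (String × List String)) (src : String) : Decidable (Pre_all_paths_memo_v1 G src) := by
  unfold Pre_all_paths_memo_v1; infer_instance

def pvWitness_all_paths_memo_v1 : (List (String × List String)) × String :=
  ([("svr", ["fft", "out"]), ("fft", ["dac"]), ("dac", ["out"])], "svr")

def Spec_all_paths_memo_v1 (G : List (String × List String)) (src : String) (out : List Int) : Prop := out = all_paths_memo_v1_alt G src
instance (G : List (String × List String)) (src : String) (out : List Int) : Decidable (Spec_all_paths_memo_v1 G src out) := by unfold Spec_all_paths_memo_v1; infer_instance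

-- ===== CLAIM (what is proved, stated in full; the proofs are below) =====
def Claim_equal_all_paths_memo_v1 : Prop := ∀ (G : List (String × List String)) (src : String), Dom_all_paths_memo_v1 G src → Pre_all_paths_memo_v1 G src → Spec_all_paths_memo_v1 G src (all_paths_memo_v1 G src)

-- ===== LEMMAS AND PROOFS =====

-- the intended per-node 4-vector, as a fuelled pure recursion (proof device)
mutual
def pvF (G : List (String × List String)) : Nat → String → Option (Int × Int × Int × Int)
  | 0, _ => none
  | f+1, cur =>
    if cur == "out" then some (1, 0, 0, 0)
    else
      match pvFList G f (pvGet G cur) with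
      | none => none
      | some s => some (pvAdjT cur s)
  termination_by f _ => (f, 0)

def pvFList (G : List (String × List String)) : Nat → List String → Option (Int × Int × Int × Int)
  | _, [] => some (0, 0, 0, 0)
  | f, v :: vs =>
    match pvF G f v, pvFList G f vs with
    | some r, some s => some (pvVAdd r s)
    | _, _ => none
  termination_by f l => (f, l.length + 1)
end

def pvToL (p : Int × Int × Int × Int) : List Int := [p.1, p.2.1, p.2.2.1, p.2.2.2]

def pvSumR (g : String → Int × Int × Int × Int) : List String → Int × Int × Int × Int
  | [] => (0, 0, 0, 0)
  | v :: vs => pvVAdd (g v) (pvSumR g vs)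

-- the limit value of pvF
def pvFv (G : List (String × List String)) (cur : String) (r : Int × Int × Int × Int) : Prop :=
  ∃ f, pvF G f cur = some r

lemma pvVAdd_assoc (a b c : Int × Int × Int × Int) :
    pvVAdd (pvVAdd a b) c = pvVAdd a (pvVAdd b c) := by
  obtain ⟨a1, a2, a3, a4⟩ := a; obtain ⟨b1, b2, b3, b4⟩ := b; obtain ⟨c1, c2, c3, c4⟩ := c
  simp [pvVAdd]; omega

lemma pvVAdd_zero_left (a : Int × Int × Int × Int) : pvVAdd (0, 0, 0, 0) a = a := by
  obtain ⟨a1, a2, a3, a4⟩ := a; simp [pvVAdd]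

lemma pvVAdd_zero_right (a : Int × Int × Int × Int) : pvVAdd a (0, 0, 0, 0) = a := by
  obtain ⟨a1, a2, a3, a4⟩ := a; simp [pvVAdd]

lemma pvAdjT_zero (u : String) : pvAdjT u (0, 0, 0, 0) = (0, 0, 0, 0) := by
  unfold pvAdjT; split_ifs <;> simp_all

lemma pvAddL_toL (p q : Int × Int × Int × Int) :
    pvAddL (pvToL p) (pvToL q) = pvToL (pvVAdd p q) := by
  obtain ⟨a1, a2, a3, a4⟩ := p; obtain ⟨b1, b2, b3, b4⟩ := q
  simp [pvAddL, pvToL, pvVAdd]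

lemma pvAdjL_toL (u : String) (p : Int × Int × Int × Int) :
    pvAdjL u (pvToL p) = pvToL (pvAdjT u p) := by
  obtain ⟨a1, a2, a3, a4⟩ := p
  unfold pvAdjL pvAdjT pvToL
  split_ifs <;> simp_all [List.getD]

lemma pvF_mono (G : List (String × List String)) :
    ∀ f : Nat,
      (∀ cur r, pvF G f cur = some r → pvF G (f+1) cur = some r) ∧
      (∀ l s, pvFList G f l = some s → pvFList G (f+1) l = some s) := by
  intro f
  induction f with
  | zero =>
    constructor
    · intro cur r h; simp [pvF] at h
    · intro l s h
      cases l with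
      | nil => simpa [pvFList] using h
      | cons v vs => simp [pvFList, pvF] at h
  | succ f ih =>
    have hF : ∀ cur r, pvF G (f+1) cur = some r → pvF G (f+1+1) cur = some r := by
      intro cur r h
      by_cases hout : cur == "out"
      · simpa [pvF, hout] using h
      · simp only [pvF, hout, Bool.false_eq_true, if_false] at h ⊢
        cases hs : pvFList G f (pvGet G cur) with
        | none => rw [hs] at h; simp at h
        | some s =>
          rw [hs] at h
          rw [ih.2 _ _ hs]
          simpa using h
    refine ⟨hF, ?_⟩
    intro l s h
    induction l generalizing s with
    | nil => simpa [pvFList] using h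
    | cons v vs ihl =>
      simp only [pvFList] at h ⊢
      cases hr : pvF G (f+1) v with
      | none => rw [hr] at h; simp at h
      | some r =>
        rw [hr] at h
        cases hvs : pvFList G (f+1) vs with
        | none => rw [hvs] at h; simp at h
        | some sv =>
          rw [hvs] at h
          rw [hF _ _ hr, ihl _ hvs]
          simpa using h

lemma pvF_mono_le (G : List (String × List String)) {f g : Nat} (h : f ≤ g)
    {cur : String} {r : Int × Int × Int × Int} (hf : pvF G f cur = some r) :
    pvF G g cur = some r := by
  induction h with
  | refl => exact hf
  | step _h ih => exact (pvF_mono G _).1 _ _ ih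

lemma pvFList_mono_le (G : List (String × List String)) {f g : Nat} (h : f ≤ g)
    {l : List String} {s : Int × Int × Int × Int} (hf : pvFList G f l = some s) :
    pvFList G g l = some s := by
  induction h with
  | refl => exact hf
  | step _h ih => exact (pvF_mono G _).2 _ _ ih

lemma pvFv_unique {G : List (String × List String)} {cur : String}
    {r t : Int × Int × Int × Int} (hr : pvFv G cur r) (ht : pvFv G cur t) : r = t := by
  obtain ⟨f, hf⟩ := hr; obtain ⟨g, hg⟩ := ht
  rcases le_total f g with h | h
  · have h2 := pvF_mono_le G h hf; rw [h2] at hg; exact Option.some.inj hg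
  · have h2 := pvF_mono_le G h hg; rw [h2] at hf; exact (Option.some.inj hf).symm

lemma pvFv_out (G : List (String × List String)) : pvFv G "out" (1, 0, 0, 0) :=
  ⟨1, by simp [pvF]⟩

lemma pvFv_nonkey {G : List (String × List String)} {cur : String}
    (h : List.lookup cur G = none) (h2 : cur ≠ "out") : pvFv G cur (0, 0, 0, 0) :=
  ⟨1, by simp [pvF, pvGet, h, h2, pvFList, pvAdjT_zero]⟩

lemma pvFList_of_pointwise {G : List (String × List String)} (g : String → Int × Int × Int × Int) :
    ∀ l : List String, (∀ v ∈ l, pvFv G v (g v)) →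
      ∃ f, pvFList G f l = some (pvSumR g l) := by
  intro l
  induction l with
  | nil => exact fun _ => ⟨0, by simp [pvFList, pvSumR]⟩
  | cons v vs ih =>
    intro hall
    obtain ⟨fv, hfv⟩ := hall v (by simp)
    obtain ⟨fs, hfs⟩ := ih (fun w hw => hall w (by simp [hw]))
    refine ⟨max fv fs, ?_⟩
    have h1 := pvF_mono_le G (le_max_left fv fs) hfv
    have h2 := pvFList_mono_le G (le_max_right fv fs) hfs
    simp [pvFList, pvSumR, h1, h2]

lemma pvFv_node {G : List (String × List String)} {cur : String}
    (g : String → Int × Int × Int × Int) (hcur : cur ≠ "out")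
    (hall : ∀ v ∈ pvGet G cur, pvFv G v (g v)) :
    pvFv G cur (pvAdjT cur (pvSumR g (pvGet G cur))) := by
  obtain ⟨f, hf⟩ := pvFList_of_pointwise g (pvGet G cur) hall
  exact ⟨f + 1, by simp [pvF, hcur, hf]⟩

lemma foldl_pvVAdd (g : String → Int × Int × Int × Int) :
    ∀ (l : List String) (acc : Int × Int × Int × Int),
      l.foldl (fun a v => pvVAdd a (g v)) acc = pvVAdd acc (pvSumR g l) := by
  intro l
  induction l with
  | nil => intro acc; simp [pvSumR, pvVAdd_zero_right]
  | cons v vs ih =>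
    intro acc
    simp only [List.foldl_cons, ih, pvSumR, pvVAdd_assoc]

lemma pvFList_isSome_of_all {G : List (String × List String)} {f : Nat} :
    ∀ l : List String, (∀ v ∈ l, ∃ r, pvF G f v = some r) →
      ∃ s, pvFList G f l = some s := by
  intro l
  induction l with
  | nil => exact fun _ => ⟨(0, 0, 0, 0), by simp [pvFList]⟩
  | cons v vs ih =>
    intro hall
    obtain ⟨r, hr⟩ := hall v (by simp)
    obtain ⟨s, hs⟩ := ih (fun w hw => hall w (by simp [hw]))
    exact ⟨pvVAdd r s, by simp [pvFList, hr, hs]⟩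

lemma pvOk_sound (G : List (String × List String)) :
    ∀ (f : Nat) (p : List String) (cur : String),
      pvOk G f p cur = true → ∃ r, pvF G f cur = some r := by
  intro f
  induction f with
  | zero => intro p cur h; simp [pvOk] at h
  | succ f ih =>
    intro p cur h
    simp [pvOk] at h
    obtain ⟨-, h2⟩ := h
    by_cases hout : cur = "out"
    · exact ⟨(1, 0, 0, 0), by simp [pvF, hout]⟩
    · have hall : ∀ v ∈ pvGet G cur, ∃ r, pvF G f v = some r := by
        intro v hv
        rcases h2 with h2 | h2
        · exact absurd h2 hout
        · exact ih (cur :: p) v (h2 v hv)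
      obtain ⟨s, hs⟩ := pvFList_isSome_of_all (pvGet G cur) hall
      exact ⟨pvAdjT cur s, by simp [pvF, hout, hs]⟩

-- ===== A-side =====
def pvGood (G : List (String × List String)) (mem : PySem.Dict String (List Int)) : Prop :=
  ∀ k w, mem.get? k = some w → ∃ t, pvFv G k t ∧ w = pvToL t

lemma pvInner_correct (G : List (String × List String)) :
    ∀ f : Nat,
      (∀ mem cur r, pvGood G mem → pvF G f cur = some r →
        ∃ mem', pvInner G f mem cur = some (mem', pvToL r) ∧ pvGood G mem' ∧
          (cur ≠ "out" → mem'.get? cur = some (pvToL r))) ∧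
      (∀ mem l s acc, pvGood G mem → pvFList G f l = some s →
        ∃ mem', pvInnerList G f mem l (pvToL acc) = some (mem', pvToL (pvVAdd acc s)) ∧
          pvGood G mem') := by
  intro f
  induction f with
  | zero =>
    constructor
    · intro mem cur r _ h; simp [pvF] at h
    · intro mem l s acc hg h
      cases l with
      | nil =>
        refine ⟨mem, ?_, hg⟩
        have hs : s = (0, 0, 0, 0) := by simpa [pvFList] using h.symm
        simp [pvInnerList, hs, pvVAdd_zero_right]
      | cons v vs => simp [pvFList, pvF] at h
  | succ f ih =>
    have hF : ∀ mem cur r, pvGood G mem → pvF G (f+1) cur = some r →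
        ∃ mem', pvInner G (f+1) mem cur = some (mem', pvToL r) ∧ pvGood G mem' ∧
          (cur ≠ "out" → mem'.get? cur = some (pvToL r)) := by
      intro mem cur r hg h
      cases hmem : mem.get? cur with
      | some w =>
        obtain ⟨t, hfv, rfl⟩ := hg _ _ hmem
        have ht : r = t := pvFv_unique ⟨f + 1, h⟩ hfv
        subst ht
        exact ⟨mem, by simp [pvInner, hmem], hg, fun _ => hmem⟩
      | none =>
        by_cases hout : cur = "out"
        · subst hout
          have hr : r = (1, 0, 0, 0) := by simpa [pvF] using h.symm
          refine ⟨mem, by simp [pvInner, hmem, hr, pvToL], hg, fun hc => absurd rfl hc⟩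
        · have hout' : (cur == "out") = false := by simpa using hout
          simp only [pvF, hout', Bool.false_eq_true, if_false] at h
          cases hs : pvFList G f (pvGet G cur) with
          | none => rw [hs] at h; simp at h
          | some s =>
            rw [hs] at h
            have hr : r = pvAdjT cur s := by simpa using h.symm
            obtain ⟨mem', hrun, hg'⟩ := ih.2 mem (pvGet G cur) s (0, 0, 0, 0) hg hs
            have hzero : pvToL ((0 : Int), (0 : Int), (0 : Int), (0 : Int)) = [0, 0, 0, 0] := rfl
            rw [hzero] at hrun
            rw [pvVAdd_zero_left] at hrun
            refine ⟨mem'.insert cur (pvToL r), ?_, ?_, ?_⟩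
            · simp only [pvInner, hmem, hout', Bool.false_eq_true, if_false, hrun]
              rw [pvAdjL_toL, ← hr]
            · intro k w hk
              by_cases hkc : k = cur
              · subst hkc
                rw [PySem.Dict.get?_insert_self] at hk
                exact ⟨r, ⟨f + 1, by
                  simp only [pvF, hout', Bool.false_eq_true, if_false, hs]; rw [hr]⟩,
                  (Option.some.injEq _ _ ▸ hk).symm⟩
              · rw [PySem.Dict.get?_insert_of_ne _ _ hkc] at hk
                exact hg' _ _ hk
            · intro _; exact PySem.Dict.get?_insert_self _ _ _
    refine ⟨hF, ?_⟩
    intro mem l s acc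
    induction l generalizing mem s acc with
    | nil =>
      intro hg h
      have hs : s = (0, 0, 0, 0) := by simpa [pvFList] using h.symm
      exact ⟨mem, by simp [pvInnerList, hs, pvVAdd_zero_right], hg⟩
    | cons v vs ihl =>
      intro hg h
      simp only [pvFList] at h
      cases hr : pvF G (f+1) v with
      | none => rw [hr] at h; simp at h
      | some r =>
        rw [hr] at h
        cases hvs : pvFList G (f+1) vs with
        | none => rw [hvs] at h; simp at h
        | some sv =>
          rw [hvs] at h
          have hsum : s = pvVAdd r sv := by simpa using h.symm
          obtain ⟨mem1, hrun1, hg1, _⟩ := hF mem v r hg hr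
          obtain ⟨mem2, hrun2, hg2⟩ := ihl mem1 sv (pvVAdd acc r) hg1 hvs
          refine ⟨mem2, ?_, hg2⟩
          simp only [pvInnerList, hrun1, pvAddL_toL, hrun2, hsum]
          rw [pvVAdd_assoc]

-- ===== B-side =====
def pvGoodB (G : List (String × List String))
    (val : PySem.Dict String (Int × Int × Int × Int)) : Prop :=
  ∀ k t, val.get? k = some t → pvFv G k t

lemma pvItems_mem :
    ∀ (l : List (String × List String)) (seen : List String) (p : String × List String),
      p ∈ pvItems l seen → seen.contains p.1 = false ∧ List.lookup p.1 l = some p.2 := by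
  intro l
  induction l with
  | nil => intro seen p h; simp [pvItems] at h
  | cons a rest ih =>
    intro seen p h
    obtain ⟨u, su⟩ := a
    simp only [pvItems] at h
    by_cases hseen : seen.contains u
    · rw [if_pos hseen] at h
      obtain ⟨h1, h2⟩ := ih seen p h
      have hne : p.1 ≠ u := by
        intro he; rw [he] at h1; rw [h1] at hseen; exact Bool.noConfusion hseen
      refine ⟨h1, ?_⟩
      have hbe : (p.1 == u) = false := beq_eq_false_iff_ne.mpr hne
      simpa [List.lookup, hbe] using h2
    · rw [if_neg hseen] at h
      rcases List.mem_cons.mp h with he | hm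
      · subst he
        exact ⟨Bool.eq_false_iff.mpr hseen, by simp [List.lookup]⟩
      · obtain ⟨h1, h2⟩ := ih (u :: seen) p hm
        simp only [List.contains_cons, Bool.or_eq_false_iff] at h1
        have hne : p.1 ≠ u := by
          intro he; rw [he] at h1; simp at h1
        have hbe : (p.1 == u) = false := beq_eq_false_iff_ne.mpr hne
        exact ⟨h1.2, by simpa [List.lookup, hbe] using h2⟩

lemma pvItems_complete :
    ∀ (l : List (String × List String)) (seen : List String) (u : String) (s : List String),
      List.lookup u l = some s → seen.contains u = false → (u, s) ∈ pvItems l seen := by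
  intro l
  induction l with
  | nil => intro seen u s h _; simp [List.lookup] at h
  | cons a rest ih =>
    intro seen u s h hseen
    obtain ⟨b, sb⟩ := a
    simp only [pvItems]
    by_cases hub : u = b
    · subst hub
      have hs : s = sb := by simpa [List.lookup] using h.symm
      subst hs
      rw [if_neg (by rw [hseen]; exact Bool.noConfusion)]
      exact List.mem_cons_self ..
    · have hbe : (u == b) = false := beq_eq_false_iff_ne.mpr hub
      have h' : List.lookup u rest = some s := by simpa [List.lookup, hbe] using h
      by_cases hbs : seen.contains b
      · rw [if_pos hbs]; exact ih seen u s h' hseen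
      · rw [if_neg hbs]
        refine List.mem_cons_of_mem _ (ih (b :: seen) u s h' ?_)
        simp only [List.contains_cons, Bool.or_eq_false_iff]
        exact ⟨hbe, hseen⟩

lemma pvRoundGo_mono_get? {G : List (String × List String)} :
    ∀ (l : List (String × List String)) val {k t},
      val.get? k = some t → (pvRoundGo G l val).get? k = some t := by
  intro l
  induction l with
  | nil => intro val k t h; simpa [pvRoundGo] using h
  | cons a rest ih =>
    intro val k t h
    obtain ⟨u, succs⟩ := a
    simp only [pvRoundGo]
    by_cases h1 : (u == "out" || val.contains u) = true
    · rw [if_pos h1]; exact ih val h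
    · rw [if_neg h1]
      by_cases h2 : succs.all (pvKnown G val) = true
      · rw [if_pos h2]
        apply ih
        have hcu : val.contains u = false := by
          simp only [Bool.or_eq_true, not_or] at h1
          exact Bool.eq_false_iff.mpr h1.2
        have hne : k ≠ u := by
          intro he; subst he
          rw [PySem.Dict.contains_eq_isSome_get?, h] at hcu; simp at hcu
        rw [PySem.Dict.get?_insert_of_ne _ _ hne]
        exact h
      · rw [if_neg h2]; exact ih val h

lemma pvRoundGo_mono_contains {G : List (String × List String)} :
    ∀ (l : List (String × List String)) val {k},
      val.contains k = true → (pvRoundGo G l val).contains k = true := by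
  intro l val k h
  rw [PySem.Dict.contains_eq_isSome_get?] at h
  obtain ⟨t, ht⟩ := Option.isSome_iff_exists.mp h
  rw [PySem.Dict.contains_eq_isSome_get?, pvRoundGo_mono_get? l val ht]
  rfl

lemma pvKnown_insert {G : List (String × List String)} {val : PySem.Dict String (Int × Int × Int × Int)}
    {v u : String} {w : Int × Int × Int × Int}
    (h : pvKnown G val v = true) : pvKnown G (val.insert u w) v = true := by
  simp only [pvKnown, PySem.Dict.contains_insert, Bool.or_eq_true] at h ⊢
  tauto

lemma pvGoodB_roundGo {G : List (String × List String)} :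
    ∀ (l : List (String × List String)) val,
      (∀ p ∈ l, List.lookup p.1 G = some p.2) → pvGoodB G val →
      pvGoodB G (pvRoundGo G l val) := by
  intro l
  induction l with
  | nil => intro val _ hg; simpa [pvRoundGo] using hg
  | cons a rest ih =>
    intro val hl hg
    obtain ⟨u, succs⟩ := a
    have hlr : ∀ p ∈ rest, List.lookup p.1 G = some p.2 := fun p hp => hl p (by simp [hp])
    simp only [pvRoundGo]
    by_cases h1 : (u == "out" || val.contains u) = true
    · rw [if_pos h1]; exact ih val hlr hg
    · rw [if_neg h1]
      by_cases h2 : succs.all (pvKnown G val) = true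
      · rw [if_pos h2]
        apply ih _ hlr
        have hu : u ≠ "out" := by
          simp only [Bool.or_eq_true, not_or] at h1
          simpa using h1.1
        have hget : pvGet G u = succs := by
          simp [pvGet, hl (u, succs) (by simp)]
        have hall : ∀ v ∈ pvGet G u, pvFv G v (pvValue val v) := by
          rw [hget]
          intro v hv
          by_cases hvo : v = "out"
          · subst hvo; simpa [pvValue] using pvFv_out G
          · by_cases hvc : val.contains v = true
            · rw [PySem.Dict.contains_eq_isSome_get?] at hvc
              obtain ⟨t, ht⟩ := Option.isSome_iff_exists.mp hvc
              have hpv : pvValue val v = t := by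
                simp only [pvValue, if_neg (by simpa using hvo : ¬((v == "out") = true))]
                exact PySem.Dict.getD_of_get?_eq_some val _ ht
              rw [hpv]; exact hg _ _ ht
            · have hkv := List.all_eq_true.mp h2 v hv
              simp only [pvKnown, Bool.or_eq_true] at hkv
              have hnk : pvHasKey G v = false := by
                rcases hkv with (hx | hx) | hx
                · exact absurd (by simpa using hx) hvo
                · exact absurd hx hvc
                · simpa using hx
              have hcf : val.contains v = false := Bool.eq_false_iff.mpr hvc
              have hpv : pvValue val v = (0, 0, 0, 0) := by
                simp only [pvValue, if_neg (by simpa using hvo : ¬((v == "out") = true))]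
                exact PySem.Dict.getD_of_not_contains val _ hcf
              rw [hpv]
              refine pvFv_nonkey ?_ hvo
              simpa [pvHasKey, Option.isSome_eq_false_iff, Option.isNone_iff_eq_none] using hnk
        have hfv : pvFv G u (pvAdjT u (succs.foldl (fun acc v => pvVAdd acc (pvValue val v)) (0, 0, 0, 0))) := by
          rw [foldl_pvVAdd, pvVAdd_zero_left]
          have h3 := pvFv_node (cur := u) (fun v => pvValue val v) hu hall
          rw [hget] at h3
          exact h3
        intro k t hk
        by_cases hkc : k = u
        · subst hkc
          rw [PySem.Dict.get?_insert_self] at hk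
          have ht : t = pvAdjT k (succs.foldl (fun acc v => pvVAdd acc (pvValue val v)) (0, 0, 0, 0)) :=
            (Option.some.inj hk).symm
          rw [ht]; exact hfv
        · rw [PySem.Dict.get?_insert_of_ne _ _ hkc] at hk
          exact hg _ _ hk
      · rw [if_neg h2]; exact ih val hlr hg

lemma pvRoundGo_adds {G : List (String × List String)} {u : String} {S : List String} :
    ∀ (l : List (String × List String)) val,
      (u, S) ∈ l → u ≠ "out" → (∀ v ∈ S, pvKnown G val v = true) →
      (pvRoundGo G l val).contains u = true := by
  intro l
  induction l with
  | nil => intro val h; simp at h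
  | cons a rest ih =>
    intro val hmem hu hkn
    obtain ⟨b, sb⟩ := a
    simp only [pvRoundGo]
    by_cases h1 : (b == "out" || val.contains b) = true
    · rw [if_pos h1]
      rcases List.mem_cons.mp hmem with he | hm
      · have hb : u = b := congrArg Prod.fst he
        subst hb
        have hcb : val.contains u = true := by
          rcases (show (u == "out") = true ∨ val.contains u = true by simpa using h1) with hx | hx
          · exact absurd (by simpa using hx) hu
          · exact hx
        exact pvRoundGo_mono_contains rest _ hcb
      · exact ih val hm hu hkn
    · rw [if_neg h1]
      by_cases h2 : sb.all (pvKnown G val) = true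
      · rw [if_pos h2]
        rcases List.mem_cons.mp hmem with he | hm
        · have hb : u = b := congrArg Prod.fst he
          subst hb
          exact pvRoundGo_mono_contains rest _ (PySem.Dict.contains_insert_self _ _ _)
        · exact ih _ hm hu (fun v hv => pvKnown_insert (hkn v hv))
      · rw [if_neg h2]
        rcases List.mem_cons.mp hmem with he | hm
        · exfalso
          have hb : S = sb := congrArg Prod.snd he
          subst hb
          exact h2 (List.all_eq_true.mpr (fun v hv => hkn v hv))
        · exact ih val hm hu hkn

lemma pvGoodB_rounds (G : List (String × List String)) :
    ∀ n, pvGoodB G (pvRounds G (pvItems G []) n) := by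
  intro n
  induction n with
  | zero => intro k t h; simp [pvRounds, PySem.Dict.get?_empty] at h
  | succ n ih =>
    exact pvGoodB_roundGo _ _ (fun p hp => (pvItems_mem G [] p hp).2) ih

lemma pvOk_rounds (G : List (String × List String)) :
    ∀ (f : Nat) (p : List String) (cur : String),
      pvOk G f p cur = true → pvKnown G (pvRounds G (pvItems G []) f) cur = true := by
  intro f
  induction f with
  | zero => intro p cur h; simp [pvOk] at h
  | succ f ih =>
    intro p cur h
    simp [pvOk] at h
    obtain ⟨-, h2⟩ := h
    by_cases hout : cur = "out"
    · simp [pvKnown, hout]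
    · replace h2 : ∀ v ∈ pvGet G cur, pvOk G f (cur :: p) v = true := by
        rcases h2 with h2 | h2
        · exact absurd h2 hout
        · exact h2
      by_cases hk : pvHasKey G cur = true
      · obtain ⟨S, hS⟩ := Option.isSome_iff_exists.mp hk
        have hget : pvGet G cur = S := by simp [pvGet, hS]
        have hkn : ∀ v ∈ S, pvKnown G (pvRounds G (pvItems G []) f) v = true :=
          fun v hv => ih (cur :: p) v (h2 v (hget ▸ hv))
        have hin : (cur, S) ∈ pvItems G [] := pvItems_complete G [] cur S hS rfl
        have hc : (pvRounds G (pvItems G []) (f+1)).contains cur = true := by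
          simp only [pvRounds]
          exact pvRoundGo_adds _ _ hin hout hkn
        simp [pvKnown, hc]
      · simp [pvKnown, Bool.eq_false_iff.mpr hk]

-- ===== VERDICT (by name: the statement is the Claim_ definition above) =====
theorem all_paths_memo_v1_spec : Claim_equal_all_paths_memo_v1 := by
  unfold Claim_equal_all_paths_memo_v1
  intro G src _ hPre
  obtain ⟨hsrc, hok⟩ := hPre
  obtain ⟨r, hF⟩ := pvOk_sound G (G.length + 2) [] src hok
  have hGoodE : pvGood G PySem.Dict.empty := by
    intro k w hk; simp [PySem.Dict.get?_empty] at hk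
  obtain ⟨mem', hrun, _, hget⟩ := (pvInner_correct G (G.length + 2)).1 PySem.Dict.empty src r hGoodE hF
  have hA : all_paths_memo_v1 G src = pvToL r := by
    unfold all_paths_memo_v1
    rw [hrun]
    exact PySem.Dict.getD_of_get?_eq_some _ _ (hget hsrc)
  unfold Spec_all_paths_memo_v1
  rw [hA]
  unfold all_paths_memo_v1_alt
  have hsrcb : (src == "out") = false := by simpa using hsrc
  simp only [hsrcb, Bool.false_eq_true, if_false]
  have hknown := pvOk_rounds G (G.length + 2) [] src hok
  set val := pvRounds G (pvItems G []) (G.length + 2) with hval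
  by_cases hc : val.contains src = true
  · rw [PySem.Dict.contains_eq_isSome_get?] at hc
    obtain ⟨t, ht⟩ := Option.isSome_iff_exists.mp hc
    have hfvt : pvFv G src t := pvGoodB_rounds G (G.length + 2) _ _ ht
    have : r = t := pvFv_unique ⟨G.length + 2, hF⟩ hfvt
    subst this
    rw [ht]
    obtain ⟨a, b, c, d⟩ := r
    rfl
  · have hgn : val.get? src = none := by
      rcases h : val.get? src with _ | t
      · rfl
      · exact absurd (by rw [PySem.Dict.contains_eq_isSome_get?, h]; rfl) hc
    rw [hgn]
    simp only [pvKnown, hsrcb, Bool.false_or, Bool.or_eq_true] at hknown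
    rcases hknown with hc' | hk
    · exact absurd hc' hc
    · have hlk : List.lookup src G = none := by
        simp only [Bool.not_eq_true'] at hk
        simpa [pvHasKey, Option.isSome_eq_false_iff, Option.isNone_iff_eq_none] using hk
      have : r = (0, 0, 0, 0) := by
        have h2 : pvF G (G.length + 1 + 1) src = some (0, 0, 0, 0) := by
          simp [pvF, hsrcb, pvGet, hlk, pvFList, pvAdjT_zero]
        rw [show G.length + 2 = G.length + 1 + 1 from rfl] at hF
        rw [h2] at hF
        exact (Option.some.inj hF).symm
      rw [this]
      rfl
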